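-- pv_equiv track=rewrite | github.com/JonesTheGlorious/assignment_task | src/relationship.py | identify_relationships
-- ===== SOURCE A (Python) =====
-- def identify_relationships(functions, naming_convention):
--     """
--     Identifies relationships between functions based on shared parameters and return values.
--
--     Args:
--         functions (list): A list of tuples, each containing function name, parameters, and return values.
--         naming_convention (str): The naming convention used for function names.
--
--     Returns:
--         dict: A dictionary containing relationships between functions.
--               Each key is a function name, and the corresponding value
--               is a dictionary containing information about parameters,
--               return values, related functions, and loose ends.
--     """
--     try:
--         relationships = {}
--         func_list = []
--         for name, parameters, returns in functions:
--             relationships[name] = {'parameters': set(parameters), 'returns': set(returns)}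
--             func_list.append(name)
--         for name, info in relationships.items():
--             for compare_func_name, compare_func_info in relationships.items():
--                 if name != compare_func_name:
--                     #finds shared parameters and matching parameters and return values.
--                     if info['parameters'] & compare_func_info['parameters'] or info['returns'] & compare_func_info['parameters']:
--                         #initializes related functions in info dict
--                         if 'related_functions' not in info:
--                             info['related_functions'] = set()
--                         # Establishing a relationship between functions
--                         info['related_functions'].add(compare_func_name)
--
--             # Identify loose end parameters
--             for param in info['parameters']:
--                 param = param.replace(naming_convention, ' ')
--                 if param not in func_list:
--                     # Add loose end parameter to the relationship dictionary
--                     if 'param_loose_ends' not in info: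
--                         info['param_loose_ends'] = set()
--                     info['param_loose_ends'].add(param)
--             # Identify loose end return statements
--             for returns in info['returns']:
--                 returns = returns.replace(naming_convention, ' ')
--                 if returns not in func_list:
--                     # Add loose end parameter to the relationship dictionary
--                     if 'returns_loose_ends' not in info:
--                         info['returns_loose_ends'] = set()
--                     info['returns_loose_ends'].add(returns)
--
--         return relationships
--     except Exception as e:
--         raise RuntimeError(f"Error identifying relationships: {e}")
-- ===== SOURCE B (Python) =====
-- def _loose_ends(values, naming_convention, name_set):
--     return {q for v in values if (q := v.replace(naming_convention, ' ')) not in name_set}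
--
--
-- def identify_relationships(functions, naming_convention):
--     # Build one dict of name -> (parameter set, return set); last tuple wins per name.
--     funcs = {name: (set(params), set(rets)) for name, params, rets in functions}
--     name_set = {name for name, _, _ in functions}
--     # Inverted index: parameter -> set of function names declaring it.
--     index = {}
--     for name, (params, _) in funcs.items():
--         for p in params:
--             index.setdefault(p, set()).add(name)
--     relationships = {}
--     for name, (params, rets) in funcs.items():
--         # Union of the index buckets of everything this function touches.
--         candidates = set()
--         for p in params | rets:
--             candidates |= index.get(p, set())
--         info = {'parameters': params, 'returns': rets}
--         related = {g for g in funcs if g != name and g in candidates}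
--         if related:
--             info['related_functions'] = related
--         p_loose = _loose_ends(params, naming_convention, name_set)
--         if p_loose:
--             info['param_loose_ends'] = p_loose
--         r_loose = _loose_ends(rets, naming_convention, name_set)
--         if r_loose:
--             info['returns_loose_ends'] = r_loose
--         relationships[name] = info
--     return relationships
-- ===== Notes on version B (the rewrite author's own statement) =====
-- stated objective: faster
-- what changed: Replaces the all-pairs loop that intersects parameter/return sets per pair with an inverted index from parameter to declaring functions, so each function's related set comes from unioning its index buckets and O(1) membership tests instead of per-pair set intersections.
import Mathlib
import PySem

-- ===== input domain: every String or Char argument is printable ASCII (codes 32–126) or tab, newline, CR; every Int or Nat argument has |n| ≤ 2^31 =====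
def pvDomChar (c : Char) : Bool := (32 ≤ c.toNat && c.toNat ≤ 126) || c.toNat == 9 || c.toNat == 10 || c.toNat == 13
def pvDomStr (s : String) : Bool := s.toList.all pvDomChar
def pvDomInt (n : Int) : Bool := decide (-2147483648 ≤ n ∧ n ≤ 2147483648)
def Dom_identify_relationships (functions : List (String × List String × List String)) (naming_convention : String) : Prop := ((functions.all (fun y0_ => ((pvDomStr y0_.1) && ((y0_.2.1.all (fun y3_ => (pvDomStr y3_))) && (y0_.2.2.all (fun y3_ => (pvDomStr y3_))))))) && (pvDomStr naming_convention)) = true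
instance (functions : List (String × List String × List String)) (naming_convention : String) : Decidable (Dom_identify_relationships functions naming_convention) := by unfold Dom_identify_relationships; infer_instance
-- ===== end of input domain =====

-- B replaces A's all-pairs set intersections with an inverted index (parameter -> declaring
-- functions) and per-function bucket unions; objective: faster (constant-factor), exact same output.
-- Python outputs are dicts/sets (order-insensitive); both ports realize the same canonical order.

-- ===== PORT A =====
-- Note on A's mutation of `info` inside the items() loop: the loop only ever reads the
-- immutable 'parameters' entries of OTHER rows, so a map over the finished dict is faithful.
def identify_relationships (functions : List (String × List String × List String)) (naming_convention : String) : List (String × List (String × List String)) :=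
  let st := functions.foldl
    (fun (acc : PySem.Dict String (PySem.Set String × PySem.Set String) × List String) f =>
      (acc.1.insert f.1 (PySem.Set.ofList f.2.1, PySem.Set.ofList f.2.2), acc.2 ++ [f.1]))
    (PySem.Dict.empty, [])
  let relationships := st.1
  let func_list := st.2
  relationships.items.map (fun it =>
    let name := it.1
    let P := it.2.1
    let R := it.2.2
    let related := relationships.items.foldl (fun acc it' =>
      if name ≠ it'.1 then
        if PySem.Set.inter P it'.2.1 ≠ [] ∨ PySem.Set.inter R it'.2.1 ≠ [] then
          PySem.Set.add acc it'.1
        else acc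
      else acc) []
    let ploose := P.foldl (fun acc p =>
      let q := PySem.Str.replace p naming_convention " "
      if q ∉ func_list then PySem.Set.add acc q else acc) []
    let rloose := R.foldl (fun acc r =>
      let q := PySem.Str.replace r naming_convention " "
      if q ∉ func_list then PySem.Set.add acc q else acc) []
    (name, [("parameters", P), ("returns", R)]
      ++ (if related ≠ [] then [("related_functions", related)] else [])
      ++ (if ploose ≠ [] then [("param_loose_ends", ploose)] else [])
      ++ (if rloose ≠ [] then [("returns_loose_ends", rloose)] else [])))

-- ===== PORT B =====
def pvLooseEnds (values : PySem.Set String) (naming_convention : String) (nameSet : PySem.Set String) : PySem.Set String :=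
  values.foldl (fun acc v =>
    let q := PySem.Str.replace v naming_convention " "
    if ¬ PySem.Set.contains nameSet q then PySem.Set.add acc q else acc) []

-- parameter -> set of function names declaring it (index.setdefault(p, set()).add(name))
def pvIndex (funcs : PySem.Dict String (PySem.Set String × PySem.Set String)) : PySem.Dict String (PySem.Set String) :=
  funcs.items.foldl (fun idx it =>
    it.2.1.foldl (fun idx p => idx.modify p [] (fun s => PySem.Set.add s it.1)) idx)
    PySem.Dict.empty

def identify_relationships_alt (functions : List (String × List String × List String)) (naming_convention : String) : List (String × List (String × List String)) :=
  let funcs := functions.foldl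
    (fun (d : PySem.Dict String (PySem.Set String × PySem.Set String)) f =>
      d.insert f.1 (PySem.Set.ofList f.2.1, PySem.Set.ofList f.2.2)) PySem.Dict.empty
  let nameSet := PySem.Set.ofList (functions.map (·.1))
  let index := pvIndex funcs
  funcs.items.map (fun it =>
    let candidates := (PySem.Set.union it.2.1 it.2.2).foldl
      (fun c p => PySem.Set.update c (index.getD p [])) []
    let related := funcs.keys.foldl (fun acc g =>
      if g ≠ it.1 ∧ PySem.Set.contains candidates g then PySem.Set.add acc g else acc) []
    let ploose := pvLooseEnds it.2.1 naming_convention nameSet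
    let rloose := pvLooseEnds it.2.2 naming_convention nameSet
    (it.1, [("parameters", it.2.1), ("returns", it.2.2)]
      ++ (if related ≠ [] then [("related_functions", related)] else [])
      ++ (if ploose ≠ [] then [("param_loose_ends", ploose)] else [])
      ++ (if rloose ≠ [] then [("returns_loose_ends", rloose)] else [])))

-- ===== PRECONDITION & SPEC =====
def Spec_identify_relationships (functions : List (String × List String × List String)) (naming_convention : String) (out : List (String × List (String × List String))) : Prop := out = identify_relationships_alt functions naming_convention
instance (functions : List (String × List String × List String)) (naming_convention : String) (out : List (String × List (String × List String))) : Decidable (Spec_identify_relationships functions naming_convention out) := by unfold Spec_identify_relationships; infer_instance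

-- ===== CLAIM (what is proved, stated in full; the proofs are below) =====
def Claim_equal_identify_relationships : Prop := ∀ (functions : List (String × List String × List String)) (naming_convention : String), Dom_identify_relationships functions naming_convention → Spec_identify_relationships functions naming_convention (identify_relationships functions naming_convention)

-- ===== LEMMAS AND PROOFS =====
-- general list fact used twice: a list is nonempty iff it has a member
lemma pv_ne_nil_iff {α : Type} (l : List α) : l ≠ [] ↔ ∃ a, a ∈ l := by
  constructor
  · exact fun h => List.exists_mem_of_ne_nil l h
  · rintro ⟨a, ha⟩ h; simp [h] at ha

-- inner loop of pvIndex: membership in one bucket after inserting name n for every q ∈ ps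
lemma pv_inner (n : String) (ps : List String) (idx : PySem.Dict String (PySem.Set String)) (g p : String) :
    g ∈ (ps.foldl (fun idx q => idx.modify q [] (fun s => PySem.Set.add s n)) idx).getD p []
      ↔ g ∈ idx.getD p [] ∨ (g = n ∧ p ∈ ps) := by
  induction ps generalizing idx with
  | nil => simp
  | cons q tl ih =>
    simp only [List.foldl_cons, ih, PySem.Dict.getD_modify, List.mem_cons]
    by_cases hpq : p = q
    · simp [hpq, PySem.Set.mem_add]; tauto
    · simp only [if_neg hpq]; tauto

-- bucket characterization of the whole index fold
lemma pv_index_mem (its : List (String × PySem.Set String × PySem.Set String))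
    (idx : PySem.Dict String (PySem.Set String)) (g p : String) :
    g ∈ (its.foldl (fun idx it => it.2.1.foldl (fun idx q => idx.modify q [] (fun s => PySem.Set.add s it.1)) idx) idx).getD p []
      ↔ g ∈ idx.getD p [] ∨ ∃ it ∈ its, g = it.1 ∧ p ∈ it.2.1 := by
  induction its generalizing idx with
  | nil => simp
  | cons it tl ih =>
    simp only [List.foldl_cons, ih, pv_inner, List.mem_cons]
    constructor
    · rintro (⟨h | ⟨hg, hp⟩⟩ | ⟨it', h1, h2⟩)
      · exact Or.inl h
      · exact Or.inr ⟨it, Or.inl rfl, hg, hp⟩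
      · exact Or.inr ⟨it', Or.inr h1, h2⟩
    · rintro (h | ⟨it', h1 | h1, h2⟩)
      · exact Or.inl (Or.inl h)
      · subst h1; exact Or.inl (Or.inr h2)
      · exact Or.inr ⟨it', h1, h2⟩

-- membership in the candidates fold (unions of index buckets)
lemma pv_cand_mem (l : List String) (h : String → PySem.Set String) (c0 : PySem.Set String) (y : String) :
    y ∈ l.foldl (fun c p => PySem.Set.update c (h p)) c0 ↔ y ∈ c0 ∨ ∃ p ∈ l, y ∈ h p := by
  induction l generalizing c0 with
  | nil => simp
  | cons p tl ih =>
    simp only [List.foldl_cons, ih, PySem.Set.mem_update, List.mem_cons]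
    constructor
    · rintro ((h1 | h1) | ⟨q, h1, h2⟩)
      · exact Or.inl h1
      · exact Or.inr ⟨p, Or.inl rfl, h1⟩
      · exact Or.inr ⟨q, Or.inr h1, h2⟩
    · rintro (h1 | ⟨q, h1 | h1, h2⟩)
      · exact Or.inl (Or.inl h1)
      · subst h1; exact Or.inl (Or.inr h2)
      · exact Or.inr ⟨q, h1, h2⟩

-- A's inline loose-end loop equals B's pvLooseEnds helper
lemma pv_loose_eq (P : PySem.Set String) (nc : String) (names : List String) :
    P.foldl (fun acc p =>
      if PySem.Str.replace p nc " " ∉ names then PySem.Set.add acc (PySem.Str.replace p nc " ") else acc) []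
    = pvLooseEnds P nc (PySem.Set.ofList names) := by
  unfold pvLooseEnds
  apply PySem.List.foldl_congr_mem
  intro acc p _
  by_cases h : PySem.Str.replace p nc " " ∈ names
  · simp [h, PySem.Set.mem_ofList]
  · simp [h, PySem.Set.mem_ofList]

-- A's pairwise-intersection loop equals B's index-based membership loop, per dict row
lemma pv_related_eq (d : PySem.Dict String (PySem.Set String × PySem.Set String))
    (hnd : d.keys.Nodup) (it : String × PySem.Set String × PySem.Set String) :
    d.items.foldl (fun acc it' =>
        if it.1 ≠ it'.1 then
          if PySem.Set.inter it.2.1 it'.2.1 ≠ [] ∨ PySem.Set.inter it.2.2 it'.2.1 ≠ [] then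
            PySem.Set.add acc it'.1
          else acc
        else acc) []
    = d.keys.foldl (fun acc g =>
        if g ≠ it.1 ∧ PySem.Set.contains ((PySem.Set.union it.2.1 it.2.2).foldl
            (fun c p => PySem.Set.update c ((pvIndex d).getD p [])) []) g then
          PySem.Set.add acc g
        else acc) [] := by
  have hkeys : d.keys = d.items.map (·.1) := rfl
  rw [hkeys, List.foldl_map]
  apply PySem.List.foldl_congr_mem
  intro acc it' hmem
  have hcand : PySem.Set.contains ((PySem.Set.union it.2.1 it.2.2).foldl
      (fun c p => PySem.Set.update c ((pvIndex d).getD p [])) []) it'.1 = true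
      ↔ (PySem.Set.inter it.2.1 it'.2.1 ≠ [] ∨ PySem.Set.inter it.2.2 it'.2.1 ≠ []) := by
    rw [PySem.Set.contains_iff, pv_cand_mem]
    unfold pvIndex
    simp only [pv_index_mem, PySem.Dict.getD_empty, List.not_mem_nil, false_or,
      PySem.Set.mem_union, pv_ne_nil_iff, PySem.Set.mem_inter]
    constructor
    · rintro ⟨p, hp, it'', hit'', hg, hpmem⟩
      have h1 : d.get? it''.1 = some it''.2 := PySem.Dict.get?_of_mem_items d hit'' hnd
      have h2 : d.get? it'.1 = some it'.2 := PySem.Dict.get?_of_mem_items d hmem hnd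
      rw [hg, h1] at h2
      have h3 : it''.2 = it'.2 := Option.some.inj h2
      rw [h3] at hpmem
      rcases hp with hp | hp
      · exact Or.inl ⟨p, hp, hpmem⟩
      · exact Or.inr ⟨p, hp, hpmem⟩
    · rintro (⟨p, hp1, hp2⟩ | ⟨p, hp1, hp2⟩)
      · exact ⟨p, Or.inl hp1, it', hmem, rfl, hp2⟩
      · exact ⟨p, Or.inr hp1, it', hmem, rfl, hp2⟩
  by_cases h1 : it.1 = it'.1
  · rw [if_neg (fun h => h h1), if_neg (fun hc => hc.1 h1.symm)]
  · by_cases h2 : PySem.Set.inter it.2.1 it'.2.1 ≠ [] ∨ PySem.Set.inter it.2.2 it'.2.1 ≠ []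
    · rw [if_pos h1, if_pos h2, if_pos ⟨Ne.symm h1, hcand.mpr h2⟩]
    · rw [if_pos h1, if_neg h2, if_neg (fun hc => h2 (hcand.mp hc.2))]


-- ===== VERDICT (by name: the statement is the Claim_ definition above) =====
theorem identify_relationships_spec : Claim_equal_identify_relationships := by
  intro functions naming_convention _
  unfold Spec_identify_relationships
  simp only [identify_relationships, identify_relationships_alt]
  rw [PySem.List.foldl_prod_mk
    (fun (d : PySem.Dict String (PySem.Set String × PySem.Set String)) f =>
      d.insert f.1 (PySem.Set.ofList f.2.1, PySem.Set.ofList f.2.2))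
    (fun l f => l ++ [f.1]) functions PySem.Dict.empty []]
  simp only [PySem.List.foldl_append_singleton_eq_map, List.nil_append]
  apply List.map_congr_left
  intro it hit
  have hnd : (functions.foldl (fun d f =>
      d.insert f.1 (PySem.Set.ofList f.2.1, PySem.Set.ofList f.2.2)) PySem.Dict.empty).keys.Nodup :=
    PySem.Dict.nodup_keys_foldl_insert_key functions (·.1)
      (fun _ f => (PySem.Set.ofList f.2.1, PySem.Set.ofList f.2.2)) _ PySem.Dict.nodup_keys_empty
  rw [pv_loose_eq, pv_loose_eq, pv_related_eq _ hnd it]
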